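-- pv_equiv track=rewrite | github.com/glhlr/DaiMeng | DaiMeng/program/business0530/hownet_get_db.py | brackets_count
-- ===== SOURCE A (Python) =====
-- def brackets_count(str_x):
--     L_brackets = [('(', ')'), ('[', ']'), ('{', '}'), ('<', '>')]  # 知网使用的括号对
--     brackets_count_list = [[str_x.count(i), str_x.count(j)]
--                            for i, j in L_brackets]
--     brackets_count_list[3][0] = brackets_count_list[3][0] - str_x.count(
--         '<--')  # 剔除括号外的'<--'的数量
--     brackets_count_list[3][1] = brackets_count_list[3][1] - str_x.count(
--         '-->')  # 剔除括号外的'-->'的数量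
--     brackets_count_list2 = sum([(i - j) for i, j in brackets_count_list])
--     return brackets_count_list2
-- ===== SOURCE B (Python) =====
-- def brackets_count(str_x):
--     delta = {'(': 1, '[': 1, '{': 1, '<': 1, ')': -1, ']': -1, '}': -1, '>': -1}
--     s = 0
--     for ch in str_x:
--         s += delta.get(ch, 0)
--     return s - str_x.count('<--') + str_x.count('-->')
-- ===== Notes on version B (the rewrite author's own statement) =====
-- stated objective: simpler
-- what changed: Replaces the eight per-bracket str.count scans and the mutable count-pair list by a single pass over the characters accumulating a +1/-1 delta from a dict, then applies the same two substring corrections as A.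
import Mathlib
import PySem

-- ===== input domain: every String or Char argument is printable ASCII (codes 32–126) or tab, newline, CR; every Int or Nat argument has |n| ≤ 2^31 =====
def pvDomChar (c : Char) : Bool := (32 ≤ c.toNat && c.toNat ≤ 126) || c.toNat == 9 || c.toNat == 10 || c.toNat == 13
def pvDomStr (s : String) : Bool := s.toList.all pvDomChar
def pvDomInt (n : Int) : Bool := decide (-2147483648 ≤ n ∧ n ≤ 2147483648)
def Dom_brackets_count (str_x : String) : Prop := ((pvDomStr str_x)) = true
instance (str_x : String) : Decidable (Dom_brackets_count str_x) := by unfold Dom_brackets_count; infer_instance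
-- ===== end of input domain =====

-- B replaces A's eight per-bracket str.count scans by one character pass with a ±1 delta dict
-- (objective: simpler single-pass decomposition), keeping the two substring corrections.


-- ===== PORT A =====
def brackets_count (str_x : String) : Int :=
  let L_brackets : List (String × String) := [("(", ")"), ("[", "]"), ("{", "}"), ("<", ">")]
  let brackets_count_list : List (Int × Int) :=
    L_brackets.map (fun p => ((PySem.Str.count str_x p.1 : Int), (PySem.Str.count str_x p.2 : Int)))
  -- Python mutates entry [3] in place; transcribed as List.set of the updated pair
  let e3 := brackets_count_list.getD 3 (0, 0)
  let brackets_count_list := brackets_count_list.set 3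
    (e3.1 - (PySem.Str.count str_x "<--" : Int), e3.2 - (PySem.Str.count str_x "-->" : Int))
  (brackets_count_list.map (fun p => p.1 - p.2)).sum

-- ===== PORT B =====
def pvDelta : PySem.Dict Char Int :=
  ⟨[('(', 1), ('[', 1), ('{', 1), ('<', 1), (')', -1), (']', -1), ('}', -1), ('>', -1)]⟩

def brackets_count_alt (str_x : String) : Int :=
  let s := str_x.toList.foldl (fun s ch => s + pvDelta.getD ch 0) 0
  s - (PySem.Str.count str_x "<--" : Int) + (PySem.Str.count str_x "-->" : Int)

-- ===== PRECONDITION & SPEC =====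
def Spec_brackets_count (str_x : String) (out : Int) : Prop := out = brackets_count_alt str_x
instance (str_x : String) (out : Int) : Decidable (Spec_brackets_count str_x out) := by unfold Spec_brackets_count; infer_instance

-- ===== CLAIM (what is proved, stated in full; the proofs are below) =====
def Claim_equal_brackets_count : Prop := ∀ (str_x : String), Dom_brackets_count str_x → Spec_brackets_count str_x (brackets_count str_x)

-- ===== LEMMAS AND PROOFS =====

-- PySem.Chars.count with a single-character pattern is the character count.
lemma count_go_single (c : Char) : ∀ (fuel : Nat) (l : List Char) (acc : Nat),
    l.length ≤ fuel → PySem.Chars.count.go [c] fuel l acc = acc + l.count c := by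
  intro fuel
  induction fuel with
  | zero =>
    intro l acc h
    cases l with
    | nil => simp [PySem.Chars.count.go]
    | cons a t => simp at h
  | succ n ih =>
    intro l acc h
    cases l with
    | nil => simp [PySem.Chars.count.go]
    | cons a t =>
      simp only [PySem.Chars.count.go]
      by_cases hc : a = c
      · subst hc
        simp [List.isPrefixOf, ih t (acc + 1) (by simpa using h)]
        omega
      · have hp : List.isPrefixOf [c] (a :: t) = false := by
          simp [List.isPrefixOf]
          exact fun h' => (hc h'.symm).elim
        simp [hp, hc, ih t acc (by simpa using h)]

lemma count_single (s : List Char) (c : Char) : PySem.Chars.count s [c] = s.count c := by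
  simp [PySem.Chars.count, count_go_single c s.length s 0 le_rfl]

-- The delta sum of B's pass equals the signed character counts A tallies.
lemma sum_delta (l : List Char) :
    (l.map (fun ch => pvDelta.getD ch 0)).sum =
      (l.count '(' : Int) + l.count '[' + l.count '{' + l.count '<'
        - l.count ')' - l.count ']' - l.count '}' - l.count '>' := by
  induction l with
  | nil => simp
  | cons a t ih =>
    simp only [List.map_cons, List.sum_cons, ih, List.count_cons]
    by_cases h1 : a = '('
    · subst h1
      have e : pvDelta.getD '(' 0 = 1 := by decide
      simp [e]; ring
    by_cases h2 : a = '['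
    · subst h2
      have e : pvDelta.getD '[' 0 = 1 := by decide
      simp [e]; ring
    by_cases h3 : a = '{'
    · subst h3
      have e : pvDelta.getD '{' 0 = 1 := by decide
      simp [e]; ring
    by_cases h4 : a = '<'
    · subst h4
      have e : pvDelta.getD '<' 0 = 1 := by decide
      simp [e]; ring
    by_cases h5 : a = ')'
    · subst h5
      have e : pvDelta.getD ')' 0 = -1 := by decide
      simp [e]; ring
    by_cases h6 : a = ']'
    · subst h6
      have e : pvDelta.getD ']' 0 = -1 := by decide
      simp [e]; ring
    by_cases h7 : a = '}'
    · subst h7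
      have e : pvDelta.getD '}' 0 = -1 := by decide
      simp [e]; ring
    by_cases h8 : a = '>'
    · subst h8
      have e : pvDelta.getD '>' 0 = -1 := by decide
      simp [e]; ring
    have b1 : ('(' == a) = false := by simp only [beq_eq_false_iff_ne, ne_eq]; exact fun h => h1 h.symm
    have b2 : ('[' == a) = false := by simp only [beq_eq_false_iff_ne, ne_eq]; exact fun h => h2 h.symm
    have b3 : ('{' == a) = false := by simp only [beq_eq_false_iff_ne, ne_eq]; exact fun h => h3 h.symm
    have b4 : ('<' == a) = false := by simp only [beq_eq_false_iff_ne, ne_eq]; exact fun h => h4 h.symm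
    have b5 : (')' == a) = false := by simp only [beq_eq_false_iff_ne, ne_eq]; exact fun h => h5 h.symm
    have b6 : (']' == a) = false := by simp only [beq_eq_false_iff_ne, ne_eq]; exact fun h => h6 h.symm
    have b7 : ('}' == a) = false := by simp only [beq_eq_false_iff_ne, ne_eq]; exact fun h => h7 h.symm
    have b8 : ('>' == a) = false := by simp only [beq_eq_false_iff_ne, ne_eq]; exact fun h => h8 h.symm
    have e : pvDelta.getD a 0 = 0 := by
      simp [pvDelta, PySem.Dict.getD, PySem.Dict.get?, List.find?, b1, b2, b3, b4, b5, b6, b7, b8]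
    simp [e, h1, h2, h3, h4, h5, h6, h7, h8]

-- ===== VERDICT (by name: the statement is the Claim_ definition above) =====
theorem brackets_count_spec : Claim_equal_brackets_count := by
  intro str_x _
  unfold Spec_brackets_count brackets_count brackets_count_alt
  simp only [List.map_cons, List.map_nil, List.getD, List.set]
  rw [PySem.List.foldl_add, sum_delta]
  simp [PySem.Str.count, count_single]
  ring
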